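-- pv_equiv track=rewrite | github.com/pypi-data/pypi-mirror-38 | packages/mr-clean/mr_clean-0.0.7.tar.gz/mr_clean-0.0.7/mr_clean/core/functions/colnames.py | abbrev
-- ===== SOURCE A (Python) =====
-- def abbrev(phrase,word_length = 1):
--     """ Abbreviates a phrase
--     Parameters:
--     phrase - str
--         Phrase to abbreviate
--     word_length - int, default 1
--         Length of each word after abbreviation
--
--     Ex:
--         word_word_2word
--     word_length 1: ww2w
--     word_length 2: wowo2wo
--     """
--     word_list = phrase.split('_')
--     abbreviation = ''
--     for word in word_list:
--         recording = 0
--         for character in word: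
--             if isnum(character):
--                 recording = 0
--                 abbreviation+=character
--             elif recording < word_length:
--                 abbreviation+=character
--                 recording+=1
--     return abbreviation
--
-- def isnum(character):
--     return character in ['0','1,','2','3','4','5','6','7','8','9']
-- ===== SOURCE B (Python) =====
-- def isnum(character):
--     return character in ['0','1,','2','3','4','5','6','7','8','9']
--
-- def abbrev(phrase, word_length=1):
--     # Run-based: split each word into maximal digit / non-digit runs; keep a
--     # digit run whole, keep only the first `word_length` chars of a letter run.
--     keep = max(word_length, 0)
--     pieces = []
--     for word in phrase.split('_'):
--         i = 0
--         n = len(word)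
--         while i < n:
--             j = i
--             if isnum(word[i]):
--                 while j < n and isnum(word[j]):
--                     j += 1
--                 pieces.append(word[i:j])
--             else:
--                 while j < n and not isnum(word[j]):
--                     j += 1
--                 pieces.append(word[i:min(i + keep, j)])
--             i = j
--     return ''.join(pieces)
-- ===== Notes on version B (the rewrite author's own statement) =====
-- stated objective: alternative
-- what changed: Replaces A's per-character counter over each word with an explicit split of the word into maximal digit/non-digit runs: digit runs are kept whole, non-digit runs truncated to their first word_length characters, and the pieces joined at the end (reusing the original isnum helper, typo included).
import Mathlib
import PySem

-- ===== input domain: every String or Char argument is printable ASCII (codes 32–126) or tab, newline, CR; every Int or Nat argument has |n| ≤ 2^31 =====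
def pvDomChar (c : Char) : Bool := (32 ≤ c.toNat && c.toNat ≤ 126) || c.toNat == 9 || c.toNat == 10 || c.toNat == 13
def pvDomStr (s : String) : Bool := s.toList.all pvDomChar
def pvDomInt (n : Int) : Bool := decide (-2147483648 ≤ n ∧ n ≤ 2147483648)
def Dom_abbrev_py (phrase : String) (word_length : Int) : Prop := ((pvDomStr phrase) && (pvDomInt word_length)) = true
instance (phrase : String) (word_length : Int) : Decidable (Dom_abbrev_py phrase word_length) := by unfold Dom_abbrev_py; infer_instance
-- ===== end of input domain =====

-- B replaces A's per-character "recording" counter with an explicit split of each word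
-- into maximal digit / non-digit runs (keep digit runs whole, truncate letter runs);
-- objective: alternative decomposition, same asymptotic cost.


-- ===== PORT A =====
-- Python: isnum(character) — '1,' is a typo kept from the source, so '1' counts as a letter.
-- (both Source A and Source B define this identical helper; Python iteration yields 1-char strings)
def isnum (character : String) : Bool :=
  ["0", "1,", "2", "3", "4", "5", "6", "7", "8", "9"].contains character

def isnumCh (c : Char) : Bool := isnum (String.ofList [c])

def abbrev_py (phrase : String) (word_length : Int) : String :=
  let word_list := PySem.Chars.splitOn phrase.toList ['_']
  let abbreviation : String :=
    word_list.foldl (fun abbreviation word =>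
      (word.foldl (fun (st : Int × String) character =>
          if isnumCh character then (0, st.2.push character)
          else if st.1 < word_length then (st.1 + 1, st.2.push character)
          else st)
        ((0 : Int), abbreviation)).2) ""
  abbreviation

-- ===== PORT B =====
-- the inner while-loops of Source B: cut off the maximal run at the cursor, then recurse on the rest
def abbrevRunsB (keep : Nat) : List Char → List (List Char)
  | [] => []
  | c :: cs =>
    if isnumCh c then
      (c :: cs).takeWhile isnumCh :: abbrevRunsB keep ((c :: cs).dropWhile isnumCh)
    else
      ((c :: cs).takeWhile (fun d => !isnumCh d)).take keep
        :: abbrevRunsB keep ((c :: cs).dropWhile (fun d => !isnumCh d))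
  termination_by cs => cs.length
  decreasing_by
  · simp only [List.dropWhile_cons, *]
    exact Nat.lt_succ_of_le (List.length_dropWhile_le _ _)
  · simp only [List.dropWhile_cons, *]
    simp
    exact List.length_dropWhile_le _ _

def abbrev_py_alt (phrase : String) (word_length : Int) : String :=
  let keep := (max word_length 0).toNat
  let pieces := (PySem.Chars.splitOn phrase.toList ['_']).flatMap (abbrevRunsB keep)
  String.ofList (PySem.Chars.join [] pieces)

-- ===== PRECONDITION & SPEC =====
def Spec_abbrev_py (phrase : String) (word_length : Int) (out : String) : Prop := out = abbrev_py_alt phrase word_length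
instance (phrase : String) (word_length : Int) (out : String) : Decidable (Spec_abbrev_py phrase word_length out) := by unfold Spec_abbrev_py; infer_instance

-- ===== CLAIM (what is proved, stated in full; the proofs are below) =====
def Claim_equal_abbrev_py : Prop := ∀ (phrase : String) (word_length : Int), Dom_abbrev_py phrase word_length → Spec_abbrev_py phrase word_length (abbrev_py phrase word_length)

-- ===== LEMMAS AND PROOFS =====

-- A's inner loop, char-level, as a recursion: recording counter r, reset on digit
def fA (wl : Int) (r : Int) : List Char → List Char
  | [] => []
  | c :: cs =>
    if isnumCh c then c :: fA wl 0 cs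
    else if r < wl then c :: fA wl (r + 1) cs
    else fA wl r cs

theorem foldA_eq (wl : Int) (cs : List Char) : ∀ (r : Int) (acc : String),
    ((cs.foldl (fun (st : Int × String) character =>
        if isnumCh character then (0, st.2.push character)
        else if st.1 < wl then (st.1 + 1, st.2.push character)
        else st) (r, acc)).2).toList = acc.toList ++ fA wl r cs := by
  induction cs with
  | nil => intro r acc; simp [fA]
  | cons c cs ih =>
    intro r acc
    by_cases h : isnumCh c = true
    · simp [fA, h, ih, String.toList_push]
    · by_cases h2 : r < wl
      · simp [fA, h, h2, ih, String.toList_push]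
      · simp [fA, h, h2, ih]

theorem fA_reset (wl : Int) (rest : List Char)
    (h : rest = [] ∨ ∃ d ds, rest = d :: ds ∧ isnumCh d = true) (r : Int) :
    fA wl r rest = fA wl 0 rest := by
  rcases h with h | ⟨d, ds, rfl, hd⟩
  · subst h; rfl
  · simp [fA, hd]

theorem fA_digit_run (wl : Int) (run rest : List Char)
    (h : ∀ c ∈ run, isnumCh c = true) :
    fA wl 0 (run ++ rest) = run ++ fA wl 0 rest := by
  induction run with
  | nil => simp
  | cons c run ih =>
    have hc := h c (by simp)
    simp only [List.cons_append, fA, hc, if_pos]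
    simp [ih (fun x hx => h x (by simp [hx]))]

theorem fA_letter_run (wl : Int) (run : List Char) (rest : List Char)
    (h : ∀ c ∈ run, isnumCh c = false)
    (hrest : rest = [] ∨ ∃ d ds, rest = d :: ds ∧ isnumCh d = true) :
    ∀ r : Int, fA wl r (run ++ rest) = run.take (wl - r).toNat ++ fA wl 0 rest := by
  induction run with
  | nil => intro r; simpa using fA_reset wl rest hrest r
  | cons c run ih =>
    intro r
    have hc := h c (by simp)
    have ih' := ih (fun x hx => h x (by simp [hx]))
    by_cases h2 : r < wl
    · have : (wl - r).toNat = ((wl - (r + 1)).toNat) + 1 := by omega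
      simp only [List.cons_append, fA, hc, Bool.false_eq_true, if_false, h2, if_pos, this,
        List.take_succ_cons]
      simp [ih']
    · have : (wl - r).toNat = 0 := by omega
      simp [fA, hc, h2, this, ih']

theorem dropWhile_head (p : Char → Bool) (cs : List Char) :
    cs.dropWhile p = [] ∨ ∃ d ds, cs.dropWhile p = d :: ds ∧ p d = false := by
  induction cs with
  | nil => left; rfl
  | cons c cs ih =>
    by_cases h : p c = true
    · simpa [h] using ih
    · right
      exact ⟨c, cs, by simp [List.dropWhile_cons, h], by simpa using h⟩

theorem fA_eq_runs (wl : Int) (cs : List Char) :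
    fA wl 0 cs = (abbrevRunsB wl.toNat cs).flatten := by
  induction cs using abbrevRunsB.induct with
  | case1 => simp [fA, abbrevRunsB]
  | case2 c cs h ih =>
    rw [abbrevRunsB]
    simp only [h, if_pos, List.flatten_cons]
    have hsplit := List.takeWhile_append_dropWhile (p := isnumCh) (l := c :: cs)
    conv_lhs => rw [← hsplit]
    rw [fA_digit_run wl _ _ (fun x hx => List.mem_takeWhile_imp hx), ih]
  | case3 c cs h ih =>
    rw [abbrevRunsB]
    simp only [h, Bool.false_eq_true, if_false, List.flatten_cons]
    have hsplit := List.takeWhile_append_dropWhile (p := fun d => !isnumCh d) (l := c :: cs)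
    conv_lhs => rw [← hsplit]
    have hhead := dropWhile_head (fun d => !isnumCh d) (c :: cs)
    have hrest : (c :: cs).dropWhile (fun d => !isnumCh d) = [] ∨
        ∃ d ds, (c :: cs).dropWhile (fun d => !isnumCh d) = d :: ds ∧ isnumCh d = true := by
      rcases hhead with h1 | ⟨d, ds, hd, hpd⟩
      · left; exact h1
      · right; exact ⟨d, ds, hd, by simpa using hpd⟩
    have := fA_letter_run wl ((c :: cs).takeWhile (fun d => !isnumCh d)) _
      (fun x hx => by simpa using List.mem_takeWhile_imp hx) hrest 0
    rw [this, ih]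
    simp

theorem join_nil_eq_flatten (parts : List (List Char)) :
    PySem.Chars.join [] parts = parts.flatten := by
  induction parts with
  | nil => rfl
  | cons p parts ih =>
    cases parts with
    | nil => simp [PySem.Chars.join, List.intercalate]
    | cons q parts =>
      simp only [PySem.Chars.join, List.intercalate] at *
      simp_all [List.flatten_cons]

theorem flatten_flatMap_eq {α β : Type} (g : α → List (List β)) (l : List α) :
    (l.flatMap g).flatten = (l.map (fun w => (g w).flatten)).flatten := by
  induction l with
  | nil => rfl
  | cons a l ih => simp [List.flatMap_cons, List.flatten_append, ih]

theorem foldWords_eq (wl : Int) (words : List (List Char)) : ∀ acc : String,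
    ((words.foldl (fun abbreviation word =>
        (word.foldl (fun (st : Int × String) character =>
            if isnumCh character then (0, st.2.push character)
            else if st.1 < wl then (st.1 + 1, st.2.push character)
            else st) ((0 : Int), abbreviation)).2) acc)).toList
      = acc.toList ++ (words.map (fA wl 0)).flatten := by
  induction words with
  | nil => intro acc; simp
  | cons w words ih =>
    intro acc
    simp only [List.foldl_cons, ih, foldA_eq, List.map_cons, List.flatten_cons]
    simp

theorem maxToNat (wl : Int) : (max wl 0).toNat = wl.toNat := by omega

-- ===== VERDICT (by name: the statement is the Claim_ definition above) =====
theorem abbrev_py_spec : Claim_equal_abbrev_py := by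
  intro phrase word_length _
  unfold Spec_abbrev_py
  have hmain : (abbrev_py phrase word_length).toList = (abbrev_py_alt phrase word_length).toList := by
    simp only [abbrev_py, abbrev_py_alt]
    rw [foldWords_eq, String.toList_ofList, join_nil_eq_flatten, maxToNat, flatten_flatMap_eq,
      List.map_congr_left fun w _ => fA_eq_runs word_length w]
    simp
  calc abbrev_py phrase word_length
      = String.ofList (abbrev_py phrase word_length).toList := String.ofList_toList.symm
    _ = String.ofList (abbrev_py_alt phrase word_length).toList := by rw [hmain]
    _ = abbrev_py_alt phrase word_length := String.ofList_toList
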